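-- pv_equiv track=rewrite | github.com/Mohan-123-design/npi-healthcare-extractor | profile_google/main.py | _extract_workplace_name_from_text
-- ===== SOURCE A (Python) =====
-- def _extract_workplace_name_from_text(text: str) -> str:
--     """
--     Given the plain-text response, extract a single workplace/organization name.
--     """
--     if not text:
--         return ""
--
--     lines = [l.strip() for l in text.splitlines() if l.strip()]
--     if not lines:
--         return ""
--
--     def is_disclaimer(line_l: str) -> bool:
--         patterns = [
--             "cannot determine",
--             "cannot identify",
--             "unable to",
--             "not able to",
--             "no information",
--             "do not contain",
--             "insufficient information",
--             "based on the provided search results",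
--             "based on the search results",
--         ]
--         return any(p in line_l for p in patterns)
--
--     def strip_prefix(line: str, prefixes: list):
--         line_l = line.lower()
--         for p in prefixes:
--             if line_l.startswith(p):
--                 return line[len(p):].strip()
--         return None
--
--     practice_prefixes = [
--         "practice name:",
--         "workplace name:",
--         "clinic name:",
--         "hospital name:",
--         "company name:",
--     ]
--     for line in lines:
--         line_l = line.lower()
--         if is_disclaimer(line_l):
--             continue
--         val = strip_prefix(line, practice_prefixes)
--         if val is not None and val.strip() and not is_disclaimer(val.lower()):
--             return val.strip()
--
--     org_prefixes = [
--         "organization name:",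
--         "employer name:",
--         "facility name:",
--     ]
--     for line in lines:
--         line_l = line.lower()
--         if is_disclaimer(line_l):
--             continue
--         val = strip_prefix(line, org_prefixes)
--         if val is not None and val.strip() and not is_disclaimer(val.lower()):
--             return val.strip()
--
--     for line in lines:
--         line_l = line.lower()
--         if is_disclaimer(line_l):
--             continue
--         generic_val = strip_prefix(line, ["name:"])
--         return (generic_val or line).strip()
--
--     return ""
-- ===== SOURCE B (Python) =====
-- def _extract_workplace_name_from_text(text: str) -> str:
--     disclaimer_patterns = [
--         "cannot determine",
--         "cannot identify",
--         "unable to",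
--         "not able to",
--         "no information",
--         "do not contain",
--         "insufficient information",
--         "based on the provided search results",
--         "based on the search results",
--     ]
--
--     def is_disclaimer(line_l: str) -> bool:
--         return any(p in line_l for p in disclaimer_patterns)
--
--     def strip_prefix(line: str, prefixes: list):
--         line_l = line.lower()
--         for p in prefixes:
--             if line_l.startswith(p):
--                 return line[len(p):].strip()
--         return None
--
--     def first_valid(line: str, prefixes: list):
--         v = strip_prefix(line, prefixes)
--         if v is not None and v and not is_disclaimer(v.lower()):
--             return v
--         return None
--
--     practice_prefixes = [
--         "practice name:",
--         "workplace name:",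
--         "clinic name:",
--         "hospital name:",
--         "company name:",
--     ]
--     org_prefixes = [
--         "organization name:",
--         "employer name:",
--         "facility name:",
--     ]
--
--     org = None
--     generic = None
--     for raw in text.splitlines():
--         line = raw.strip()
--         if not line:
--             continue
--         if is_disclaimer(line.lower()):
--             continue
--         val = first_valid(line, practice_prefixes)
--         if val is not None:
--             return val
--         if org is None:
--             org = first_valid(line, org_prefixes)
--         if generic is None:
--             g = strip_prefix(line, ["name:"])
--             generic = (g or line).strip()
--     if org is not None:
--         return org
--     if generic is not None:
--         return generic
--     return ""
-- ===== Notes on version B (the rewrite author's own statement) =====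
-- stated objective: alternative
-- what changed: A scans the cleaned line list three separate times (practice prefixes, then org prefixes, then first generic line); B makes one single pass over the raw lines, returning a practice match immediately and remembering the first valid org candidate and the first generic candidate, then picks org, else generic, else the empty string.
import Mathlib
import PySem

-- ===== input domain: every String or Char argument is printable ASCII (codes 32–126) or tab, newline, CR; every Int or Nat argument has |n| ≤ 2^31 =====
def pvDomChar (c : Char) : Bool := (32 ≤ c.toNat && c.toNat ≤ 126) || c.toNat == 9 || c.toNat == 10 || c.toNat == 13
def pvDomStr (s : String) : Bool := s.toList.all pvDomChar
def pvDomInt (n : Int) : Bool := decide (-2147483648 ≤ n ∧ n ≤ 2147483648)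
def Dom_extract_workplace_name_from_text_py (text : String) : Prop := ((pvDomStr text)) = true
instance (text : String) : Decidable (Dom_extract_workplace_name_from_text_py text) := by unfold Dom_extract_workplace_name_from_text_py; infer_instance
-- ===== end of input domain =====

-- B replaces A's three full passes over the line list by one single pass that returns a
-- practice-prefixed match immediately and keeps the first org-prefixed and first generic
-- candidates as it goes (objective: alternative decomposition, one pass instead of three).

-- ===== PORT A =====
-- helpers shared by both ports (both Pythons define these same helpers verbatim)
def pvDisclaimerPatterns : List String :=
  ["cannot determine", "cannot identify", "unable to", "not able to", "no information",
   "do not contain", "insufficient information", "based on the provided search results",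
   "based on the search results"]

def pvIsDisclaimer (lineL : String) : Bool :=
  pvDisclaimerPatterns.any (fun p => PySem.Str.isIn p lineL)

def pvStripPrefixGo (line lineL : String) : List String → Option String
  | [] => none
  | p :: ps =>
    if PySem.Str.startswith lineL p then
      some (PySem.Str.strip (PySem.Str.slice line (some (PySem.Str.len p)) none))
    else pvStripPrefixGo line lineL ps

def pvStripPrefix (line : String) (prefixes : List String) : Option String :=
  pvStripPrefixGo line (PySem.Str.lower line) prefixes

def pvPracticePrefixes : List String :=
  ["practice name:", "workplace name:", "clinic name:", "hospital name:", "company name:"]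

def pvOrgPrefixes : List String :=
  ["organization name:", "employer name:", "facility name:"]

-- (generic_val or line).strip() from the final loop; identical expression in both Pythons
def pvGenericOf (line : String) : String :=
  PySem.Str.strip (match pvStripPrefix line ["name:"] with
    | some g => if g == "" then line else g
    | none => line)

-- A's first/second loop (one recursion parametrised by the prefix list, as in the source)
def pvLoopA (prefixes : List String) : List String → Option String
  | [] => none
  | line :: rest =>
    if pvIsDisclaimer (PySem.Str.lower line) then pvLoopA prefixes rest
    else
      match pvStripPrefix line prefixes with
      | some val =>
        if PySem.Str.strip val != "" && !pvIsDisclaimer (PySem.Str.lower val) then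
          some (PySem.Str.strip val)
        else pvLoopA prefixes rest
      | none => pvLoopA prefixes rest

-- A's final loop: first non-disclaimer line
def pvLoop3A : List String → Option String
  | [] => none
  | line :: rest =>
    if pvIsDisclaimer (PySem.Str.lower line) then pvLoop3A rest
    else some (pvGenericOf line)

-- [l.strip() for l in … if l.strip()]
def pvCleanLines (raws : List String) : List String :=
  raws.filterMap (fun l =>
    if PySem.Str.strip l != "" then some (PySem.Str.strip l) else none)

def extract_workplace_name_from_text_py (text : String) : String :=
  if text == "" then ""
  else
    let lines := pvCleanLines (PySem.Str.splitlines text)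
    if lines == [] then ""
    else
      match pvLoopA pvPracticePrefixes lines with
      | some v => v
      | none =>
        match pvLoopA pvOrgPrefixes lines with
        | some v => v
        | none =>
          match pvLoop3A lines with
          | some v => v
          | none => ""

-- ===== PORT B =====
def pvFirstValid (line : String) (prefixes : List String) : Option String :=
  match pvStripPrefix line prefixes with
  | some v => if v != "" && !pvIsDisclaimer (PySem.Str.lower v) then some v else none
  | none => none

-- the single pass: early return on a practice match, first org / generic candidates kept
def pvScanB : List String → Option String → Option String → String
  | [], org, gen =>
    (match org with
     | some o => o
     | none =>
       match gen with
       | some g => g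
       | none => "")
  | raw :: rest, org, gen =>
    let line := PySem.Str.strip raw
    if line == "" then pvScanB rest org gen
    else if pvIsDisclaimer (PySem.Str.lower line) then pvScanB rest org gen
    else
      match pvFirstValid line pvPracticePrefixes with
      | some v => v
      | none =>
        pvScanB rest
          (if org.isNone then pvFirstValid line pvOrgPrefixes else org)
          (if gen.isNone then some (pvGenericOf line) else gen)

def extract_workplace_name_from_text_py_alt (text : String) : String :=
  pvScanB (PySem.Str.splitlines text) none none

-- ===== PRECONDITION & SPEC =====
def Spec_extract_workplace_name_from_text_py (text : String) (out : String) : Prop := out = extract_workplace_name_from_text_py_alt text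
instance (text : String) (out : String) : Decidable (Spec_extract_workplace_name_from_text_py text out) := by unfold Spec_extract_workplace_name_from_text_py; infer_instance

-- ===== CLAIM (what is proved, stated in full; the proofs are below) =====
def Claim_equal_extract_workplace_name_from_text_py : Prop := ∀ (text : String), Dom_extract_workplace_name_from_text_py text → Spec_extract_workplace_name_from_text_py text (extract_workplace_name_from_text_py text)

-- ===== LEMMAS AND PROOFS =====

-- a list that dropWhile fixes also fixes each of its prefixes
theorem pv_dropWhile_of_prefix {p : Char → Bool} {r m : List Char}
    (hm : List.dropWhile p m = m) (hp : r <+: m) : List.dropWhile p r = r := by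
  cases r with
  | nil => simp
  | cons a t =>
    obtain ⟨s, hs⟩ := hp
    subst hs
    rw [List.cons_append] at hm
    by_cases hpa : p a = true
    · exfalso
      have hle := List.length_dropWhile_le p (t ++ s)
      rw [List.dropWhile_cons, if_pos hpa] at hm
      rw [hm] at hle
      simp at hle
    · simp [hpa]

theorem pv_chars_strip_strip (cs : List Char) :
    PySem.Chars.strip (PySem.Chars.strip cs) = PySem.Chars.strip cs := by
  unfold PySem.Chars.strip PySem.Chars.lstrip PySem.Chars.rstrip
  generalize PySem.Chars.isspace = p
  have hmm : List.dropWhile p (List.dropWhile p cs)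
      = List.dropWhile p cs := List.dropWhile_idempotent _ _
  have hrm : (List.dropWhile p (List.dropWhile p cs).reverse).reverse
      <+: List.dropWhile p cs := by
    have h1 := List.dropWhile_suffix (l := (List.dropWhile p cs).reverse) p
    have h2 := List.reverse_prefix.mpr h1
    simpa using h2
  rw [pv_dropWhile_of_prefix hmm hrm, List.reverse_reverse, List.dropWhile_idempotent]

theorem pv_strip_strip (s : String) :
    PySem.Str.strip (PySem.Str.strip s) = PySem.Str.strip s := by
  apply String.toList_inj.mp
  simp [PySem.Str.toList_strip, pv_chars_strip_strip]

theorem pv_stripPrefixGo_strip {line lineL v : String} {ps : List String}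
    (h : pvStripPrefixGo line lineL ps = some v) : PySem.Str.strip v = v := by
  induction ps with
  | nil => simp [pvStripPrefixGo] at h
  | cons p ps ih =>
    rw [pvStripPrefixGo] at h
    by_cases hsw : PySem.Str.startswith lineL p = true
    · rw [if_pos hsw] at h
      exact (Option.some.inj h) ▸ pv_strip_strip _
    · rw [if_neg hsw] at h
      exact ih h

theorem pv_stripPrefix_strip {line v : String} {ps : List String}
    (h : pvStripPrefix line ps = some v) : PySem.Str.strip v = v :=
  pv_stripPrefixGo_strip h

-- one non-disclaimer step of A's prefixed loops is exactly B's pvFirstValid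
theorem pvLoopA_cons (prefixes : List String) (line : String) (rest : List String)
    (hnd : pvIsDisclaimer (PySem.Str.lower line) = false) :
    pvLoopA prefixes (line :: rest) =
      (pvFirstValid line prefixes).or (pvLoopA prefixes rest) := by
  cases hv : pvStripPrefix line prefixes with
  | none => simp [pvLoopA, pvFirstValid, hnd, hv]
  | some v =>
    have hs := pv_stripPrefix_strip hv
    cases hc : (v != "" && !pvIsDisclaimer (PySem.Str.lower v)) with
    | true => simp [pvLoopA, pvFirstValid, hnd, hv, hs, hc]
    | false => simp [pvLoopA, pvFirstValid, hnd, hv, hs, hc]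

def pvFinish (r1 r2 r3 : Option String) : String :=
  match r1 with
  | some v => v
  | none =>
    match r2 with
    | some v => v
    | none =>
      match r3 with
      | some v => v
      | none => ""

theorem pvScanB_eq (raws : List String) : ∀ (org gen : Option String),
    pvScanB raws org gen =
      pvFinish (pvLoopA pvPracticePrefixes (pvCleanLines raws))
        (org.or (pvLoopA pvOrgPrefixes (pvCleanLines raws)))
        (gen.or (pvLoop3A (pvCleanLines raws))) := by
  induction raws with
  | nil =>
    intro org gen
    simp only [pvScanB, pvCleanLines, List.filterMap_nil, pvLoopA, pvLoop3A, Option.or_none]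
    cases org <;> cases gen <;> rfl
  | cons raw rest ih =>
    intro org gen
    have hclean : pvCleanLines (raw :: rest) =
        (if PySem.Str.strip raw != "" then [PySem.Str.strip raw] else []) ++ pvCleanLines rest := by
      rw [pvCleanLines, List.filterMap_cons, pvCleanLines]
      cases h : (PySem.Str.strip raw != "") <;> simp
    cases h0 : (PySem.Str.strip raw == "") with
    | true =>
      have : (PySem.Str.strip raw != "") = false := by simp_all [bne]
      rw [pvScanB]
      simp only [h0, if_true, hclean, this]
      exact ih org gen
    | false =>
      have hne : (PySem.Str.strip raw != "") = true := by simp_all [bne]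
      rw [pvScanB]
      simp only [h0, hclean, hne, if_true, List.singleton_append]
      cases hd : pvIsDisclaimer (PySem.Str.lower (PySem.Str.strip raw)) with
      | true =>
        rw [pvLoopA, pvLoopA, pvLoop3A]
        simp only [hd, if_true]
        exact ih org gen
      | false =>
        rw [pvLoopA_cons _ _ _ hd, pvLoopA_cons _ _ _ hd, pvLoop3A]
        simp only [hd, Bool.false_eq_true, if_false]
        cases hfv : pvFirstValid (PySem.Str.strip raw) pvPracticePrefixes with
        | some v => rfl
        | none =>
          simp only [Option.none_or]
          have horg : (if org.isNone then pvFirstValid (PySem.Str.strip raw) pvOrgPrefixes else org).or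
              (pvLoopA pvOrgPrefixes (pvCleanLines rest)) =
              org.or ((pvFirstValid (PySem.Str.strip raw) pvOrgPrefixes).or
                (pvLoopA pvOrgPrefixes (pvCleanLines rest))) := by
            cases org <;> simp
          have hgen : (if gen.isNone then some (pvGenericOf (PySem.Str.strip raw)) else gen).or
              (pvLoop3A (pvCleanLines rest)) =
              gen.or (some (pvGenericOf (PySem.Str.strip raw))) := by
            cases gen <;> simp
          rw [ih, horg, hgen]

theorem extract_workplace_name_from_text_py_spec : Claim_equal_extract_workplace_name_from_text_py := by
  intro text _
  unfold Spec_extract_workplace_name_from_text_py extract_workplace_name_from_text_py_alt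
  rw [pvScanB_eq]
  simp only [Option.none_or]
  rw [extract_workplace_name_from_text_py]
  cases ht : (text == "") with
  | true =>
    have : text = "" := by simpa using ht
    subst this
    rfl
  | false =>
    simp only [Bool.false_eq_true, if_false]
    cases hl : (pvCleanLines (PySem.Str.splitlines text) == []) with
    | true =>
      have he : pvCleanLines (PySem.Str.splitlines text) = [] := by simpa using hl
      rw [he]
      rfl
    | false =>
      simp only [Bool.false_eq_true, if_false]
      rfl
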